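-- pv_equiv track=rewrite | github.com/tau-gamma/reduce_transitive_debts | reduce_transitive_debts.py | convert_named_list_to_unnamed_list
-- ===== SOURCE A (Python) =====
-- def convert_named_list_to_unnamed_list(l):
--     dict = {}
--     count = 0
--     nl = []
--
--     for (x, betrag, y) in l:
--         number_name_x = 0
--         if x in dict:
--             number_name_x = dict[x]
--         else:
--             count +=1
--             dict[x] = count
--             number_name_x = count
--
--         number_name_y = 0
--         if y == "All":
--             number_name_y = 0
--         else:
--             if y in dict:
--                 number_name_y = dict[y]
--             else:
--                 count +=1
--                 dict[y] = count
--                 number_name_y = count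
--         nl.append((number_name_x, betrag, number_name_y))
--     return dict, nl
-- ===== SOURCE B (Python) =====
-- def convert_named_list_to_unnamed_list(l):
--     ids = {}
--     count = 0
--     for (x, betrag, y) in l:
--         if x not in ids:
--             count += 1
--             ids[x] = count
--         if y != "All" and y not in ids:
--             count += 1
--             ids[y] = count
--     nl = [(ids[x], betrag, 0 if y == "All" else ids[y]) for (x, betrag, y) in l]
--     return ids, nl
-- ===== Notes on version B (the rewrite author's own statement) =====
-- stated objective: simpler
-- what changed: B separates the work into two plain passes - a first loop that only builds the name-to-id table (x always, y unless 'All') and a second comprehension that translates every triple through the finished table - instead of A's single loop that interleaves registration, lookups and emission with per-branch temporaries.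
import Mathlib
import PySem

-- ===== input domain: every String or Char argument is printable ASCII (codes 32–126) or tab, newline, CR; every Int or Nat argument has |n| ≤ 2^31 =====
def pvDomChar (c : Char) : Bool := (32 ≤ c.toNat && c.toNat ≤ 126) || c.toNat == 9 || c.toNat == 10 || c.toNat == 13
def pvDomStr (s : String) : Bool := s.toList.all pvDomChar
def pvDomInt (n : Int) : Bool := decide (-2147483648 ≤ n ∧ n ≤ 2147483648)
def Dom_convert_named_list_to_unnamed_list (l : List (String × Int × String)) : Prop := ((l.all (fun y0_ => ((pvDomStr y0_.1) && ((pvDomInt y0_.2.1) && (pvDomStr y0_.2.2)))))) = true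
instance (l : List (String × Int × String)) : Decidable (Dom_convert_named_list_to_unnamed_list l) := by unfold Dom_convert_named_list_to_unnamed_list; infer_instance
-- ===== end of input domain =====

-- B builds the name→id table in a first pass and emits the numeric triples in a second pass,
-- instead of A's single loop interleaving registration and emission (objective: simpler).

-- ===== PORT A =====
-- one iteration of A's loop over state (dict, count, nl)
def pvStepA (st : PySem.Dict String Int × Int × List (Int × Int × Int))
    (t : String × Int × String) : PySem.Dict String Int × Int × List (Int × Int × Int) :=
  let d := st.1; let count := st.2.1; let nl := st.2.2
  let x := t.1; let betrag := t.2.1; let y := t.2.2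
  -- x-branch: number_name_x, possibly registering x
  let r1 : PySem.Dict String Int × Int × Int :=
    if d.contains x then (d, count, d.getD x 0)
    else (d.insert x (count + 1), count + 1, count + 1)
  -- y-branch: number_name_y, "All" → 0, possibly registering y
  let r2 : PySem.Dict String Int × Int × Int :=
    if y == "All" then (r1.1, r1.2.1, 0)
    else if r1.1.contains y then (r1.1, r1.2.1, r1.1.getD y 0)
    else (r1.1.insert y (r1.2.1 + 1), r1.2.1 + 1, r1.2.1 + 1)
  (r2.1, r2.2.1, nl ++ [(r1.2.2, betrag, r2.2.2)])

def convert_named_list_to_unnamed_list (l : List (String × Int × String)) :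
    (List (String × Int)) × (List (Int × Int × Int)) :=
  let r := l.foldl pvStepA (PySem.Dict.empty, 0, [])
  (r.1.items, r.2.2)

-- ===== PORT B =====
-- register a name: give it the next id if it has none yet
def pvRegister (s : PySem.Dict String Int × Int) (k : String) : PySem.Dict String Int × Int :=
  if s.1.contains k then s else (s.1.insert k (s.2 + 1), s.2 + 1)

-- first pass: register x always, y unless it is "All"
def pvRegStep (s : PySem.Dict String Int × Int) (t : String × Int × String) :
    PySem.Dict String Int × Int :=
  let s1 := pvRegister s t.1
  if t.2.2 == "All" then s1 else pvRegister s1 t.2.2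

-- second pass: translate one triple through the finished table
def pvEmit (d : PySem.Dict String Int) (t : String × Int × String) : Int × Int × Int :=
  (d.getD t.1 0, t.2.1, if t.2.2 == "All" then 0 else d.getD t.2.2 0)

def convert_named_list_to_unnamed_list_alt (l : List (String × Int × String)) :
    (List (String × Int)) × (List (Int × Int × Int)) :=
  let d := (l.foldl pvRegStep (PySem.Dict.empty, 0)).1
  (d.items, l.map (pvEmit d))

-- ===== PRECONDITION & SPEC =====
def Spec_convert_named_list_to_unnamed_list (l : List (String × Int × String)) (out : (List (String × Int)) × (List (Int × Int × Int))) : Prop := out = convert_named_list_to_unnamed_list_alt l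
instance (l : List (String × Int × String)) (out : (List (String × Int)) × (List (Int × Int × Int))) : Decidable (Spec_convert_named_list_to_unnamed_list l out) := by unfold Spec_convert_named_list_to_unnamed_list; infer_instance

-- ===== CLAIM (what is proved, stated in full; the proofs are below) =====
def Claim_equal_convert_named_list_to_unnamed_list : Prop := ∀ (l : List (String × Int × String)), Dom_convert_named_list_to_unnamed_list l → Spec_convert_named_list_to_unnamed_list l (convert_named_list_to_unnamed_list l)

-- ===== LEMMAS AND PROOFS =====

-- a key already in the table keeps its id through a registration
theorem pvRegister_stable (s : PySem.Dict String Int × Int) (k' k : String)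
    (h : s.1.contains k = true) :
    (pvRegister s k').1.contains k = true ∧ (pvRegister s k').1.getD k 0 = s.1.getD k 0 := by
  unfold pvRegister
  split
  · exact ⟨h, rfl⟩
  · rename_i hk'
    have hne : k ≠ k' := by rintro rfl; simp [hk'] at h
    simp [PySem.Dict.contains_insert, h, PySem.Dict.getD_insert, hne]

theorem pvRegStep_stable (s : PySem.Dict String Int × Int) (t : String × Int × String)
    (k : String) (h : s.1.contains k = true) :
    (pvRegStep s t).1.contains k = true ∧ (pvRegStep s t).1.getD k 0 = s.1.getD k 0 := by
  unfold pvRegStep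
  have h1 := pvRegister_stable s t.1 k h
  split
  · exact h1
  · have h2 := pvRegister_stable (pvRegister s t.1) t.2.2 k h1.1
    exact ⟨h2.1, h2.2.trans h1.2⟩

-- a key already in the table keeps its id through the whole first pass
theorem pvFold_stable (l : List (String × Int × String)) :
    ∀ (s : PySem.Dict String Int × Int) (k : String), s.1.contains k = true →
    ((l.foldl pvRegStep s).1).contains k = true ∧
    ((l.foldl pvRegStep s).1).getD k 0 = s.1.getD k 0 := by
  induction l with
  | nil => intro s k h; exact ⟨h, rfl⟩
  | cons t l ih =>
    intro s k h
    have h1 := pvRegStep_stable s t k h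
    have h2 := ih (pvRegStep s t) k h1.1
    exact ⟨h2.1, h2.2.trans h1.2⟩

-- A's loop registers exactly like B's first pass, and the appended triple is the step dict's ids
theorem pvRegister_contains_self (s : PySem.Dict String Int × Int) (k : String) :
    (pvRegister s k).1.contains k = true := by
  unfold pvRegister
  split
  · assumption
  · simp [PySem.Dict.contains_insert_self]

theorem pvRegStep_contains_fst (s : PySem.Dict String Int × Int) (t : String × Int × String) :
    (pvRegStep s t).1.contains t.1 = true := by
  unfold pvRegStep
  split
  · exact pvRegister_contains_self s t.1
  · exact (pvRegister_stable (pvRegister s t.1) t.2.2 t.1 (pvRegister_contains_self s t.1)).1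

theorem pvRegStep_contains_snd (s : PySem.Dict String Int × Int) (t : String × Int × String)
    (h : (t.2.2 == "All") = false) : (pvRegStep s t).1.contains t.2.2 = true := by
  unfold pvRegStep
  simp only [h]
  exact pvRegister_contains_self _ t.2.2

-- A's loop body equals B's registration step plus the emission of the current triple
theorem pvStepA_eq (d : PySem.Dict String Int) (c : Int) (nl : List (Int × Int × Int))
    (t : String × Int × String) :
    pvStepA (d, c, nl) t =
      ((pvRegStep (d, c) t).1, (pvRegStep (d, c) t).2,
        nl ++ [pvEmit (pvRegStep (d, c) t).1 t]) := by
  obtain ⟨x, b, y⟩ := t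
  unfold pvStepA pvRegStep pvRegister pvEmit
  by_cases hx : d.contains x = true
  · by_cases hy : (y == "All") = true
    · simp [hx, hy]
    · simp only [hx, if_true, hy]
      by_cases hyd : d.contains y = true
      · simp [hyd]
      · have hne : x ≠ y := by rintro rfl; rw [hx] at hyd; exact hyd rfl
        simp [hyd, PySem.Dict.getD_insert, hne]
  · rw [Bool.not_eq_true] at hx
    by_cases hy : (y == "All") = true
    · simp [hx, hy, PySem.Dict.getD_insert_self]
    · simp only [hx, Bool.false_eq_true, if_false, hy]
      by_cases hyd : (d.insert x (c + 1)).contains y = true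
      · simp [hyd, PySem.Dict.getD_insert_self]
      · have hne : y ≠ x := by
          rintro rfl
          exact hyd (PySem.Dict.contains_insert_self d y (c + 1))
        simp [hyd, PySem.Dict.getD_insert, hne.symm]

theorem pvMain (l : List (String × Int × String)) :
    ∀ (d : PySem.Dict String Int) (c : Int) (nl : List (Int × Int × Int)),
    l.foldl pvStepA (d, c, nl) =
      ((l.foldl pvRegStep (d, c)).1, (l.foldl pvRegStep (d, c)).2,
        nl ++ l.map (pvEmit (l.foldl pvRegStep (d, c)).1)) := by
  induction l with
  | nil => intro d c nl; simp
  | cons t l ih =>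
    intro d c nl
    rw [List.foldl_cons, pvStepA_eq, List.foldl_cons, ih]
    simp only [Prod.mk.eta]
    have hemit : pvEmit (pvRegStep (d, c) t).1 t =
        pvEmit (l.foldl pvRegStep (pvRegStep (d, c) t)).1 t := by
      have hx := pvFold_stable l (pvRegStep (d, c) t) t.1 (pvRegStep_contains_fst (d, c) t)
      unfold pvEmit
      by_cases hy : (t.2.2 == "All") = true
      · simp [hy, hx.2]
      · rw [Bool.not_eq_true] at hy
        have hys := pvFold_stable l (pvRegStep (d, c) t) t.2.2 (pvRegStep_contains_snd (d, c) t hy)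
        simp [hy, hx.2, hys.2]
    rw [hemit, List.map_cons, List.append_cons, List.append_assoc]
    simp

-- ===== VERDICT (by name: the statement is the Claim_ definition above) =====
theorem convert_named_list_to_unnamed_list_spec : Claim_equal_convert_named_list_to_unnamed_list := by
  intro l _
  unfold Spec_convert_named_list_to_unnamed_list convert_named_list_to_unnamed_list
    convert_named_list_to_unnamed_list_alt
  rw [pvMain l PySem.Dict.empty 0 []]
  rfl
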